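-- pv_equiv track=rewrite | github.com/JiH00nKw0n/extract_agent | src/utils.py | check_valid_value
-- ===== SOURCE A (Python) =====
-- def check_valid_value(html_content: str, value: str) -> str:
--     """
--     value의 앞부분부터 시작해서 html_content에 존재하는 가장 긴 문자열을 반환
--
--     Args:
--         html_content (str): 검색할 HTML 내용
--         value (str): 확인할 값
--
--     Returns:
--         str: html_content에 존재하는 value의 가장 긴 앞부분 문자열
--     """
--     if not value or not html_content:
--         return ""
--
--     # value의 앞부분부터 점진적으로 늘려가면서 html_content에 존재하는지 확인
--     longest_match = ""
--
--     for i in range(1, len(value) + 1):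
--         substring = value[:i]
--         if substring in html_content:
--             longest_match = substring
--         else:
--             # 더 이상 매치되지 않으면 중단
--             break
--
--     return longest_match
-- ===== SOURCE B (Python) =====
-- def check_valid_value(html_content: str, value: str) -> str:
--     """Longest prefix of value that occurs in html_content, found by binary
--     search on the prefix length (containment of prefixes is monotone)."""
--     lo, hi = 0, len(value)
--     while lo < hi:
--         mid = (lo + hi + 1) // 2
--         if value[:mid] in html_content:
--             lo = mid
--         else:
--             hi = mid - 1
--     return value[:lo]
-- ===== Notes on version B (the rewrite author's own statement) =====
-- stated objective: faster
-- what changed: Replaces the incremental scan over prefix lengths 1..len(value) (each doing a substring search) by a binary search on the prefix length, exploiting that prefix-containment is monotone.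
import Mathlib
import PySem

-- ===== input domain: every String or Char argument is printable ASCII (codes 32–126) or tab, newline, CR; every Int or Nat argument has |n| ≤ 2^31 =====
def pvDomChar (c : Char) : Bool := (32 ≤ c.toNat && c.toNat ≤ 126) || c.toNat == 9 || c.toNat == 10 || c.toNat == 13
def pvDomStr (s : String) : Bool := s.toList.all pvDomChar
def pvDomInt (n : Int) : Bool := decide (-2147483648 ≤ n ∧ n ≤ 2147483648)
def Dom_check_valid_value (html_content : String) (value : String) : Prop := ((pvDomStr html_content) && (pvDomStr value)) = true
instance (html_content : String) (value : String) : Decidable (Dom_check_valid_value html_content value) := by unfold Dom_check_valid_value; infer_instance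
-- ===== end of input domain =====

-- B replaces A's incremental scan over prefix lengths by a binary search on the
-- prefix length (prefix-containment is monotone); objective: faster.

-- ===== PORT A =====
-- the 'for i in range(1, len(value)+1)' loop with its early break
def pvALoopA (html_content value : String) (i : Nat) (longest : String) : String :=
  if i ≤ value.toList.length then
    if PySem.Str.isIn (PySem.Str.slice value none (some (i : Int))) html_content then
      pvALoopA html_content value (i + 1) (PySem.Str.slice value none (some (i : Int)))
    else longest
  else longest
termination_by value.toList.length + 1 - i
decreasing_by omega

def check_valid_value (html_content : String) (value : String) : String :=
  if value.toList.isEmpty || html_content.toList.isEmpty then ""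
  else pvALoopA html_content value 1 ""

-- ===== PORT B =====
-- the 'while lo < hi' binary-search loop of Source B, returning the final lo
def pvBSearch (html_content value : String) (lo hi : Int) : Int :=
  if h : lo < hi then
    if PySem.Str.isIn (PySem.Str.slice value none (some (PySem.Int.floordiv (lo + hi + 1) 2))) html_content then
      pvBSearch html_content value (PySem.Int.floordiv (lo + hi + 1) 2) hi
    else
      pvBSearch html_content value lo (PySem.Int.floordiv (lo + hi + 1) 2 - 1)
  else lo
termination_by (hi - lo).toNat
decreasing_by
  · rw [PySem.Int.floordiv_eq_ediv_of_pos (by norm_num)]; omega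
  · rw [PySem.Int.floordiv_eq_ediv_of_pos (by norm_num)]; omega

def check_valid_value_alt (html_content : String) (value : String) : String :=
  PySem.Str.slice value none (some (pvBSearch html_content value 0 (PySem.Str.len value)))

-- ===== PRECONDITION & SPEC =====
def Spec_check_valid_value (html_content : String) (value : String) (out : String) : Prop := out = check_valid_value_alt html_content value
instance (html_content : String) (value : String) (out : String) : Decidable (Spec_check_valid_value html_content value out) := by unfold Spec_check_valid_value; infer_instance

-- ===== CLAIM (what is proved, stated in full; the proofs are below) =====
def Claim_equal_check_valid_value : Prop := ∀ (html_content : String) (value : String), Dom_check_valid_value html_content value → Spec_check_valid_value html_content value (check_valid_value html_content value)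

-- ===== LEMMAS AND PROOFS =====

-- "the prefix of value of length k occurs in html_content"
abbrev pvP (L V : List Char) (k : Nat) : Prop := PySem.Chars.isIn (V.take k) L = true

theorem pvP_zero (L V : List Char) : pvP L V 0 := by
  simp [pvP]

theorem pvP_mono {L V : List Char} {j k : Nat} (hjk : j ≤ k) (hk : pvP L V k) : pvP L V j := by
  rw [pvP, PySem.Chars.isIn_iff_infix] at *
  have hpre : V.take j <+: V.take k := by
    have : (V.take k).take j = V.take j := by
      rw [List.take_take, Nat.min_eq_left hjk]
    exact this ▸ List.take_prefix j (V.take k)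
  exact List.IsInfix.trans hpre.isInfix hk

theorem pvSlice_eq_ofList (v : String) (k : Nat) :
    PySem.Str.slice v none (some (k : Int)) = String.ofList (v.toList.take k) := by
  apply String.toList_inj.mp
  simp [PySem.Str.toList_slice, PySem.List.slice_to_natCast]

theorem pvIsIn_slice (hc v : String) (k : Nat) :
    (PySem.Str.isIn (PySem.Str.slice v none (some (k : Int))) hc = true)
      ↔ pvP hc.toList v.toList k := by
  rw [pvSlice_eq_ofList]
  simp [PySem.Str.isIn, pvP]

-- shorthand for the answer length
theorem pvALoop_eq (hc v : String) :
    ∀ (n i : Nat), v.toList.length + 1 - i = n → 1 ≤ i → i ≤ v.toList.length + 1 →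
    pvP hc.toList v.toList (i - 1) →
    pvALoopA hc v i (String.ofList (v.toList.take (i - 1)))
      = String.ofList (v.toList.take (Nat.findGreatest (pvP hc.toList v.toList) v.toList.length)) := by
  intro n
  induction n with
  | zero =>
    intro i hn h1 h2 hP
    rw [pvALoopA.eq_def]
    have hi : i = v.toList.length + 1 := by omega
    rw [if_neg (by omega)]
    have hK : Nat.findGreatest (pvP hc.toList v.toList) v.toList.length = i - 1 := by
      rw [Nat.findGreatest_eq_iff]
      exact ⟨by omega, fun _ => hP, fun m hm hm' => by omega⟩
    rw [hK]
  | succ n ih =>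
    intro i hn h1 h2 hP
    rw [pvALoopA.eq_def]
    by_cases hle : i ≤ v.toList.length
    · rw [if_pos hle]
      by_cases hin : PySem.Str.isIn (PySem.Str.slice v none (some (i : Int))) hc = true
      · rw [if_pos hin]
        have hPi : pvP hc.toList v.toList i := (pvIsIn_slice hc v i).mp hin
        have := ih (i + 1) (by omega) (by omega) (by omega) (by simpa using hPi)
        rw [pvSlice_eq_ofList]
        simpa using this
      · rw [if_neg hin]
        have hK : Nat.findGreatest (pvP hc.toList v.toList) v.toList.length = i - 1 := by
          rw [Nat.findGreatest_eq_iff]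
          refine ⟨by omega, fun _ => hP, ?_⟩
          intro m hm hm' hPm
          exact hin ((pvIsIn_slice hc v i).mpr (pvP_mono (by omega) hPm))
        rw [hK]
    · rw [if_neg hle]
      have hK : Nat.findGreatest (pvP hc.toList v.toList) v.toList.length = i - 1 := by
        rw [Nat.findGreatest_eq_iff]
        exact ⟨by omega, fun _ => hP, fun m hm hm' => by omega⟩
      rw [hK]

theorem pvA_eq (hc v : String) :
    check_valid_value hc v
      = String.ofList (v.toList.take (Nat.findGreatest (pvP hc.toList v.toList) v.toList.length)) := by
  rw [check_valid_value]
  by_cases hv : v.toList.isEmpty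
  · rw [if_pos (by simp [hv])]
    rw [List.isEmpty_iff] at hv
    simp [hv]
  · by_cases hh : hc.toList.isEmpty
    · rw [if_pos (by simp [hh])]
      rw [List.isEmpty_iff] at hh
      have hK : Nat.findGreatest (pvP hc.toList v.toList) v.toList.length = 0 := by
        rw [Nat.findGreatest_eq_zero_iff]
        intro m hm hm' hPm
        rw [pvP, PySem.Chars.isIn_iff_infix, hh, List.infix_nil] at hPm
        have : v.toList ≠ [] := by simpa [List.isEmpty_iff] using hv
        have : (v.toList.take m).length = m := by
          rw [List.length_take]; omega
        rw [hPm] at this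
        simp at this
        omega
      rw [hK]
      simp
    · rw [if_neg (by simp [List.isEmpty_iff] at hv hh ⊢; exact ⟨hv, hh⟩)]
      have h0 : (String.ofList (v.toList.take 0)) = "" := by simp
      rw [← h0]
      exact pvALoop_eq hc v (v.toList.length) 1 (by omega) (le_refl _) (by omega)
        (by simpa using pvP_zero hc.toList v.toList)

theorem pvBSearch_eq (hc v : String) :
    ∀ (n : Nat) (lo hi : Int), (hi - lo).toNat = n → 0 ≤ lo → lo ≤ hi → hi ≤ (v.toList.length : Int) →
    pvP hc.toList v.toList lo.toNat →
    (∀ k : Nat, hi < (k : Int) → k ≤ v.toList.length → ¬ pvP hc.toList v.toList k) →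
    pvBSearch hc v lo hi = (Nat.findGreatest (pvP hc.toList v.toList) v.toList.length : Int) := by
  intro n
  induction n using Nat.strong_induction_on with
  | _ n ih =>
    intro lo hi hn h0 hlh hhi hPlo hHi
    rw [pvBSearch.eq_def]
    by_cases hlt : lo < hi
    · rw [dif_pos hlt]
      have hmid : PySem.Int.floordiv (lo + hi + 1) 2 = (lo + hi + 1) / 2 :=
        PySem.Int.floordiv_eq_ediv_of_pos (by norm_num)
      have hmlo : lo < PySem.Int.floordiv (lo + hi + 1) 2 := by rw [hmid]; omega
      have hmhi : PySem.Int.floordiv (lo + hi + 1) 2 ≤ hi := by rw [hmid]; omega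
      set mid := PySem.Int.floordiv (lo + hi + 1) 2 with hmdef
      have hmid_cast : ((mid.toNat : Int)) = mid := Int.toNat_of_nonneg (by omega)
      by_cases hin : PySem.Str.isIn (PySem.Str.slice v none (some mid)) hc = true
      · rw [if_pos hin]
        have hPmid : pvP hc.toList v.toList mid.toNat := by
          rw [← hmid_cast] at hin
          exact (pvIsIn_slice hc v mid.toNat).mp hin
        exact ih (hi - mid).toNat (by omega) mid hi (rfl) (by omega) hmhi hhi hPmid hHi
      · rw [if_neg hin]
        have hnPmid : ¬ pvP hc.toList v.toList mid.toNat := by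
          intro hPm
          exact hin (by rw [← hmid_cast]; exact (pvIsIn_slice hc v mid.toNat).mpr hPm)
        refine ih (mid - 1 - lo).toNat (by omega) lo (mid - 1) rfl h0 (by omega) (by omega) hPlo ?_
        intro k hk hk' hPk
        by_cases hkhi : hi < (k : Int)
        · exact hHi k hkhi hk' hPk
        · exact hnPmid (pvP_mono (by omega) hPk)
    · rw [dif_neg hlt]
      have hlohi : lo = hi := by omega
      have : Nat.findGreatest (pvP hc.toList v.toList) v.toList.length = lo.toNat := by
        rw [Nat.findGreatest_eq_iff]
        refine ⟨by omega, fun _ => hPlo, ?_⟩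
        intro m hm hm' hPm
        exact hHi m (by omega) hm' hPm
      rw [this]; omega

theorem pvB_eq (hc v : String) :
    check_valid_value_alt hc v
      = String.ofList (v.toList.take (Nat.findGreatest (pvP hc.toList v.toList) v.toList.length)) := by
  rw [check_valid_value_alt, PySem.Str.len_eq]
  rw [pvBSearch_eq hc v (v.toList.length) 0 (v.toList.length : Int) (by omega) (by omega)
      (by omega) (le_refl _) (by simpa using pvP_zero hc.toList v.toList)
      (fun k hk hk' _ => by omega)]
  exact pvSlice_eq_ofList v _

-- ===== VERDICT (by name: the statement is the Claim_ definition above) =====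
theorem check_valid_value_spec : Claim_equal_check_valid_value := by
  intro hc v _
  unfold Spec_check_valid_value
  rw [pvA_eq, pvB_eq]
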